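-- pv_equiv track=rewrite | github.com/hyoeun98/boj | 프로그래머스/unrated/133502. 햄버거 만들기/햄버거 만들기.py | solution
-- ===== SOURCE A (Python) =====
-- def solution(ingredient):
--     answer = 0
--     idx = 0
--     hamburger = [1,2,3,1]
--     while len(ingredient) >= idx + 4:
--         if ingredient[idx:idx+4] == hamburger:
--             del ingredient[idx:idx+4]
--             idx = max(0, idx-3)
--             answer += 1
--         else:
--             idx += 1
--
--     return answer
-- ===== SOURCE B (Python) =====
-- def solution(ingredient):
--     # Single pass with a stack: push each ingredient, pop the top four when
--     # they spell out 1,2,3,1. (Note: unlike A, B does not mutate its argument;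
--     # the equivalence is about the return value.)
--     stack = []
--     answer = 0
--     for x in ingredient:
--         stack.append(x)
--         if stack[-4:] == [1, 2, 3, 1]:
--             del stack[-4:]
--             answer += 1
--     return answer
-- ===== Notes on version B (the rewrite author's own statement) =====
-- stated objective: alternative
-- what changed: Replaced A's index-scan over the mutated list (slice-compare at idx, delete the match in place, backtrack idx by 3) with a single left-to-right pass that pushes each ingredient on a stack and pops the top four when they spell 1,2,3,1.
import Mathlib
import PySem

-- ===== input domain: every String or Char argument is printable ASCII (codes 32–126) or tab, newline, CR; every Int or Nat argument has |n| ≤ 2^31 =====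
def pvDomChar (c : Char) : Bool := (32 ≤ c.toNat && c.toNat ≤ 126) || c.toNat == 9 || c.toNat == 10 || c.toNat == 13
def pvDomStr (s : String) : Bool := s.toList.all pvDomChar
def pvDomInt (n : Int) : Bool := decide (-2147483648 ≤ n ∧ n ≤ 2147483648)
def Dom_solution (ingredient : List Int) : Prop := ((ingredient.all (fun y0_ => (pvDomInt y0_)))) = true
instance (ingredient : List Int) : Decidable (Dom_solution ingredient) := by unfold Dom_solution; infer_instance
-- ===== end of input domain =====

-- B replaces A's rescan-with-backtracking over the mutated list by a single stack pass (alternative one-pass algorithm).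
-- A mutates its argument (deletes the matched slices); the equivalence proved here is about the return value only.


-- ===== PORT A =====
-- while len(ingredient) >= idx + 4: if ingredient[idx:idx+4] == [1,2,3,1]: del ...; idx = max(0,idx-3); answer += 1 else idx += 1
-- idx stays a nonnegative int in Python (starts at 0, max(0,·), +1), so it is carried as a Nat;
-- Nat's 'max 0 (idx-3)' is exactly Python's 'max(0, idx-3)' there.
-- fuel is a totality guard only: each iteration decreases ingredient.length - idx,
-- so ingredient.length + 1 steps always suffice (proved in loopMain below)
def solutionLoop (fuel : Nat) (ingredient : List Int) (idx : Nat) (answer : Int) : Int :=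
  match fuel with
  | 0 => answer
  | fuel + 1 =>
    if ingredient.length ≥ idx + 4 then
      if PySem.List.slice ingredient (some (idx : Int)) (some ((idx : Int) + 4)) = [1, 2, 3, 1] then
        -- del ingredient[idx:idx+4] leaves ingredient[:idx] + ingredient[idx+4:]
        solutionLoop fuel
          (PySem.List.slice ingredient none (some (idx : Int)) ++
           PySem.List.slice ingredient (some ((idx : Int) + 4)) none)
          (max 0 (idx - 3)) (answer + 1)
      else
        solutionLoop fuel ingredient (idx + 1) answer
    else
      answer

def solution (ingredient : List Int) : Int :=
  solutionLoop (ingredient.length + 1) ingredient 0 0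

-- ===== PORT B =====
-- the stack is kept top-first (head = top of Python's stack), so Python's
-- 'stack[-4:] == [1,2,3,1]' is 'take 4 = [1,3,2,1]' and 'del stack[-4:]' is 'drop 4'
def solution_alt (ingredient : List Int) : Int :=
  (ingredient.foldl
    (fun s x =>
      let st := x :: s.1
      if st.take 4 = [1, 3, 2, 1] then (st.drop 4, s.2 + 1) else (st, s.2))
    ([], 0)).2

-- ===== PRECONDITION & SPEC =====
def Spec_solution (ingredient : List Int) (out : Int) : Prop := out = solution_alt ingredient
instance (ingredient : List Int) (out : Int) : Decidable (Spec_solution ingredient out) := by unfold Spec_solution; infer_instance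

-- ===== CLAIM (what is proved, stated in full; the proofs are below) =====
def Claim_equal_solution : Prop := ∀ (ingredient : List Int), Dom_solution ingredient → Spec_solution ingredient (solution ingredient)

-- ===== LEMMAS AND PROOFS =====

-- fAux st xs = (final stack, number of pops) of B's stack pass starting from stack st
def fAux : List Int → List Int → List Int × Int
  | st, [] => (st, 0)
  | st, x :: xs =>
    if (x :: st).take 4 = [1, 3, 2, 1] then
      let r := fAux ((x :: st).drop 4) xs
      (r.1, r.2 + 1)
    else fAux (x :: st) xs

lemma foldl_eq_fAux (xs : List Int) : ∀ (st : List Int) (a : Int),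
    xs.foldl
      (fun s x =>
        let st := x :: s.1
        if st.take 4 = [1, 3, 2, 1] then (st.drop 4, s.2 + 1) else (st, s.2))
      (st, a) = ((fAux st xs).1, a + (fAux st xs).2) := by
  induction xs with
  | nil => intro st a; simp [fAux]
  | cons x xs ih =>
    intro st a
    rw [List.foldl_cons, fAux]
    by_cases h : (x :: st).take 4 = [1, 3, 2, 1]
    · simp only [h, if_true, ih]
      ring_nf
    · simp only [h, if_false, ih]

lemma fAux_append (u v : List Int) : ∀ st,
    fAux st (u ++ v) = ((fAux (fAux st u).1 v).1, (fAux st u).2 + (fAux (fAux st u).1 v).2) := by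
  induction u with
  | nil => intro st; simp [fAux]
  | cons x u ih =>
    intro st
    rw [List.cons_append, fAux, fAux]
    by_cases h : (x :: st).take 4 = [1, 3, 2, 1]
    · simp only [h, if_true, ih]
      ring_nf
    · simp only [h, if_false, ih]

-- NM ing m : no occurrence of [1,2,3,1] starts strictly before position m
def NM (ing : List Int) (m : Nat) : Prop :=
  ∀ p, p < m → (ing.drop p).take 4 ≠ [1, 2, 3, 1]

-- the pop condition on a reversed-prefix stack is exactly a pattern occurrence ending at k
lemma take_succ_reverse (ing : List Int) (k : Nat) (hk : k < ing.length) :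
    (ing.take (k + 1)).reverse = ing[k] :: (ing.take k).reverse := by
  rw [List.take_add_one, List.getElem?_eq_getElem hk]
  simp

lemma pop_iff (ing : List Int) (k : Nat) (hk : k < ing.length) :
    (ing.take (k + 1)).reverse.take 4 = [1, 3, 2, 1] ↔
      3 ≤ k ∧ (ing.drop (k - 3)).take 4 = [1, 2, 3, 1] := by
  rw [List.take_reverse]
  have hlen : (ing.take (k + 1)).length = k + 1 := by simp; omega
  rw [hlen]
  by_cases h3 : 3 ≤ k
  · rw [show k + 1 - 4 = k - 3 by omega, List.drop_take, show k + 1 - (k - 3) = 4 by omega]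
    constructor
    · intro h
      refine ⟨h3, ?_⟩
      have := congrArg List.reverse h
      simpa using this
    · rintro ⟨-, h⟩
      rw [h]
      rfl
  · constructor
    · intro h
      have hl4 : (((ing.take (k + 1)).drop (k + 1 - 4)).reverse).length = 4 := by rw [h]; rfl
      simp at hl4
      omega
    · rintro ⟨h, -⟩
      omega

-- processing a pattern-free segment [a, a+d) just pushes it, with no pops
lemma seg (ing : List Int) : ∀ d a, a + d ≤ ing.length →
    (∀ p, a ≤ p + 3 → p + 4 ≤ a + d → (ing.drop p).take 4 ≠ [1, 2, 3, 1]) →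
    fAux ((ing.take a).reverse) ((ing.drop a).take d) = ((ing.take (a + d)).reverse, 0) := by
  intro d
  induction d with
  | zero => intro a _ _; simp [fAux]
  | succ d ih =>
    intro a hlen hfree
    have ha : a < ing.length := by omega
    rw [List.drop_eq_getElem_cons ha, List.take_succ_cons, fAux,
      show ing[a] :: (ing.take a).reverse = (ing.take (a + 1)).reverse from
        (take_succ_reverse ing a ha).symm]
    rw [if_neg]
    · rw [ih (a + 1) (by omega) (fun p h1 h2 => hfree p (by omega) (by omega)),
        show a + 1 + d = a + (d + 1) from by omega]
    · rw [pop_iff ing a ha]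
      rintro ⟨h3, hp⟩
      exact hfree (a - 3) (by omega) (by omega) hp

lemma cons2_ne (s : List Int) : ¬(((2 : Int) :: s).take 4 = [1, 3, 2, 1]) := by
  rw [show ((2 : Int) :: s).take 4 = 2 :: s.take 3 from rfl]
  simp

lemma cons3_ne (s : List Int) : ¬(((3 : Int) :: s).take 4 = [1, 3, 2, 1]) := by
  rw [show ((3 : Int) :: s).take 4 = 3 :: s.take 3 from rfl]
  simp

lemma cons4_eq (s : List Int) : ((1 : Int) :: 3 :: 2 :: 1 :: s).take 4 = [1, 3, 2, 1] := rfl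

lemma slice4_eq (ing : List Int) (idx : Nat) :
    PySem.List.slice ing (some (idx : Int)) (some ((idx : Int) + 4)) = (ing.drop idx).take 4 := by
  rw [show ((idx : Int) + 4) = ((idx : Int) + ((4 : Nat) : Int)) by norm_num,
    PySem.List.slice_natCast_add]

lemma loopMain : ∀ (n : Nat) (ing : List Int) (idx : Nat) (ans : Int),
    ing.length - idx < n → NM ing idx →
    solutionLoop n ing idx ans = ans + (fAux ((ing.take idx).reverse) (ing.drop idx)).2 := by
  intro n
  induction n with
  | zero => intro ing idx ans hn _; omega
  | succ n ih =>
    intro ing idx ans hn hnm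
    rw [solutionLoop]
    by_cases hg : ing.length ≥ idx + 4
    · rw [if_pos hg]
      by_cases hs : PySem.List.slice ing (some (idx : Int)) (some ((idx : Int) + 4)) = [1, 2, 3, 1]
      · rw [if_pos hs]
        rw [slice4_eq] at hs
        have hg0 : idx < ing.length := by omega
        have hdecomp : ing.drop idx = 1 :: 2 :: 3 :: 1 :: ing.drop (idx + 4) := by
          have h1 := (List.take_append_drop 4 (ing.drop idx)).symm
          rw [hs, List.drop_drop] at h1
          exact h1
        have hx : ing[idx] = 1 := by
          have := congrArg (fun l => l[0]?) hdecomp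
          simpa [List.getElem?_drop, List.getElem?_eq_getElem hg0] using this
        -- rewrite the slices of the recursive call into take/drop
        rw [PySem.List.slice_to_natCast,
          show ((idx : Int) + 4) = (((idx + 4 : Nat)) : Int) by push_cast; ring,
          PySem.List.slice_from_natCast, Nat.zero_max]
        -- the four stack steps on the pattern: three pushes, then one pop
        have c1 : ¬(((1 : Int) :: (ing.take idx).reverse).take 4 = [1, 3, 2, 1]) := by
          rw [show (1 : Int) :: (ing.take idx).reverse = (ing.take (idx + 1)).reverse from by
            rw [take_succ_reverse ing idx hg0, hx]]
          rw [pop_iff ing idx hg0]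
          rintro ⟨h3, hp⟩
          exact hnm (idx - 3) (by omega) hp
        have key : (fAux ((ing.take idx).reverse) (ing.drop idx)).2
            = (fAux ((ing.take idx).reverse) (ing.drop (idx + 4))).2 + 1 := by
          rw [hdecomp, fAux, if_neg c1, fAux, if_neg (cons2_ne _), fAux, if_neg (cons3_ne _),
            fAux, if_pos (cons4_eq ((ing.take idx).reverse))]
          rfl
        have e1 : (ing.take idx ++ ing.drop (idx + 4)).take (idx - 3) = ing.take (idx - 3) := by
          rw [List.take_append_of_le_length (by simp; omega), List.take_take,
            Nat.min_eq_left (by omega)]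
        have e2 : (ing.take idx ++ ing.drop (idx + 4)).drop (idx - 3)
            = (ing.drop (idx - 3)).take (idx - (idx - 3)) ++ ing.drop (idx + 4) := by
          rw [List.drop_append_of_le_length (by simp; omega), List.drop_take]
        have hnm' : NM (ing.take idx ++ ing.drop (idx + 4)) (idx - 3) := by
          intro p hp
          have hts : ((ing.take idx ++ ing.drop (idx + 4)).drop p).take 4 = (ing.drop p).take 4 := by
            rw [List.drop_append_of_le_length (by simp; omega),
              List.take_append_of_le_length (by simp; omega), List.drop_take, List.take_take,
              Nat.min_eq_left (by omega)]
          rw [hts]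
          exact hnm p (by omega)
        rw [ih (ing.take idx ++ ing.drop (idx + 4)) (idx - 3) (ans + 1)
          (by simp; omega) hnm']
        rw [e1, e2, fAux_append,
          seg ing (idx - (idx - 3)) (idx - 3) (by omega) (fun p h1 h2 => hnm p (by omega)),
          show idx - 3 + (idx - (idx - 3)) = idx by omega, key]
        ring
      · rw [if_neg hs]
        rw [slice4_eq] at hs
        have hnm' : NM ing (idx + 1) := by
          intro p hp
          rcases Nat.lt_succ_iff_lt_or_eq.mp hp with h | h
          · exact hnm p h
          · rw [h]; exact hs
        rw [ih ing (idx + 1) ans (by omega) hnm']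
        have hg0 : idx < ing.length := by omega
        conv_rhs => rw [List.drop_eq_getElem_cons hg0, fAux]
        rw [if_neg]
        · rw [← take_succ_reverse ing idx hg0]
        · rw [show ing[idx] :: (ing.take idx).reverse = (ing.take (idx + 1)).reverse from
            (take_succ_reverse ing idx hg0).symm, pop_iff ing idx hg0]
          rintro ⟨h3, hp⟩
          exact hnm (idx - 3) (by omega) hp
    · rw [if_neg hg]
      by_cases hi : idx ≤ ing.length
      · have hd : (ing.drop idx).take (ing.length - idx) = ing.drop idx := by
          apply List.take_of_length_le
          simp
        have hseg := seg ing (ing.length - idx) idx (by omega) (fun p h1 h2 => hnm p (by omega))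
        rw [hd] at hseg
        rw [hseg]
        simp
      · rw [List.drop_eq_nil_of_le (by omega)]
        simp [fAux]

-- ===== VERDICT (by name: the statement is the Claim_ definition above) =====
theorem solution_spec : Claim_equal_solution := by
  intro ing _
  show solution ing = solution_alt ing
  have h := loopMain (ing.length + 1) ing 0 0 (by omega) (by intro p hp; omega)
  simp only [List.take_zero, List.reverse_nil, List.drop_zero, zero_add] at h
  rw [solution, h, solution_alt, foldl_eq_fAux]
  simp
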